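-- pv_equiv track=rewrite | github.com/primrose101/CS322 | finite_state_machines/logical_operator.py | or_fsm
-- ===== SOURCE A (Python) =====
-- def or_fsm(string_input, index):
--     i = index
--
--     table = [
--         [1, 3, 3],
--         [3, 2, 3],
--         [3, 3, 3],
--         [3, 3, 3],
--     ]
--
--     state = 0
--     inputstate = 0
--
--     string_length = len(string_input)
--
--     while i != string_length:
--         if string_input[i] == 'O':
--             inputstate = 0
--         elif string_input[i] == 'R':
--             inputstate = 1
--         else:
--             inputstate = 2
--
--         state = table[state][inputstate]
--
--         if state == 3:
--             break
--
--         i += 1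
--
--     return i - index
-- ===== SOURCE B (Python) =====
-- def or_fsm(string_input, index):
--     i = index
--     n = len(string_input)
--     for c in "OR":
--         if i == n:
--             break
--         if string_input[i] == c:
--             i += 1
--         else:
--             break
--     return i - index
-- ===== Notes on version B (the rewrite author's own statement) =====
-- stated objective: simpler
-- what changed: Replaced the 4-state transition-table FSM scanning the input with a two-iteration cursor walk over the literal target "OR", dropping the table and state variables entirely.
import Mathlib
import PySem

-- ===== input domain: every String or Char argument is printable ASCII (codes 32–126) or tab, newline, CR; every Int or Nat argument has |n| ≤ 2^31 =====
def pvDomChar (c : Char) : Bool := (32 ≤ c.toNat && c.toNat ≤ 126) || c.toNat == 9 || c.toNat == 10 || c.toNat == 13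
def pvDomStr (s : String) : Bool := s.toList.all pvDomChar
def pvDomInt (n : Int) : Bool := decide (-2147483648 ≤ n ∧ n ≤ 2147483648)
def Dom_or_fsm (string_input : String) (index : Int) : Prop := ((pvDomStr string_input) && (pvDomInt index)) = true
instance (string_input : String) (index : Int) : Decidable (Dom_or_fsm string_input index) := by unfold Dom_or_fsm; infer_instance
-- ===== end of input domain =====

-- B replaces A's 4-state transition-table FSM over the input by a two-step cursor walk
-- over the literal target "OR" (objective: simpler). Same return value wherever A returns.

-- ===== PORT A =====
-- Python A's transition table.
def pvTable : List (List Nat) := [[1, 3, 3], [3, 2, 3], [3, 3, 3], [3, 3, 3]]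

-- Termination fact for A's while-loop: a non-breaking transition strictly increases the
-- state (cited by name in or_fsm_loop's decreasing_by).
theorem pvTable_step_lt (state inputstate : Nat)
    (h : (pvTable.getD state []).getD inputstate 3 ≠ 3) :
    3 - (pvTable.getD state []).getD inputstate 3 < 3 - state := by
  match state, inputstate with
  | 0, 0 => simp [pvTable]
  | 0, 1 => simp [pvTable] at h
  | 0, 2 => simp [pvTable] at h
  | 1, 0 => simp [pvTable] at h
  | 1, 1 => simp [pvTable]
  | 1, 2 => simp [pvTable] at h
  | 2, i => exact absurd (by match i with | 0 | 1 | 2 | (n+3) => simp [pvTable]) h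
  | 3, i => exact absurd (by match i with | 0 | 1 | 2 | (n+3) => simp [pvTable]) h
  | (n+4), i => exact absurd (by simp [pvTable]) h

-- A's while-loop, step for step: break on state 3; pyGet? = none models an IndexError
-- (excluded by Pre_or_fsm).
def or_fsm_loop (s : List Char) (string_length i : Int) (state : Nat) : Int :=
  if i = string_length then i
  else
    match PySem.List.pyGet? s i with
    | none => i  -- IndexError in Python; outside Pre_or_fsm
    | some c =>
      let inputstate : Nat := if c = 'O' then 0 else if c = 'R' then 1 else 2
      let state' := (pvTable.getD state []).getD inputstate 3
      if h : state' = 3 then i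
      else or_fsm_loop s string_length (i + 1) state'
termination_by 3 - state
decreasing_by exact pvTable_step_lt state inputstate h

def or_fsm (string_input : String) (index : Int) : Int :=
  or_fsm_loop string_input.toList (string_input.toList.length : Int) index 0 - index

-- ===== PORT B =====
-- B's for-loop over the target "OR" with a cursor i.
def or_fsm_alt_loop (s : List Char) (n i : Int) : List Char → Int
  | [] => i
  | c :: rest =>
    if i = n then i
    else
      match PySem.List.pyGet? s i with
      | none => i  -- IndexError in Python; outside Pre_or_fsm
      | some ch => if ch = c then or_fsm_alt_loop s n (i + 1) rest else i

def or_fsm_alt (string_input : String) (index : Int) : Int :=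
  or_fsm_alt_loop string_input.toList (string_input.toList.length : Int) index
    "OR".toList - index

-- ===== PRECONDITION & SPEC =====
-- Pre_ excludes exactly the indices outside [-len, len], on which both Pythons raise
-- IndexError (A returns no value there).
def Pre_or_fsm (string_input : String) (index : Int) : Prop :=
  -(string_input.toList.length : Int) ≤ index ∧ index ≤ (string_input.toList.length : Int)
instance (string_input : String) (index : Int) : Decidable (Pre_or_fsm string_input index) := by
  unfold Pre_or_fsm; infer_instance

def pvWitness_or_fsm : String × Int := ("ORACLE", 0)

def Spec_or_fsm (string_input : String) (index : Int) (out : Int) : Prop :=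
  out = or_fsm_alt string_input index
instance (string_input : String) (index : Int) (out : Int) :
    Decidable (Spec_or_fsm string_input index out) := by unfold Spec_or_fsm; infer_instance

-- ===== CLAIM (what is proved, stated in full; the proofs are below) =====
def Claim_equal_or_fsm : Prop := ∀ (string_input : String) (index : Int),
  Dom_or_fsm string_input index → Pre_or_fsm string_input index →
  Spec_or_fsm string_input index (or_fsm string_input index)

-- ===== LEMMAS AND PROOFS =====

-- In state 2 A's loop reads one more char (if any) and breaks at once, leaving i.
theorem or_fsm_loop_state2 (s : List Char) (n i : Int) : or_fsm_loop s n i 2 = i := by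
  rw [or_fsm_loop]
  split
  · rfl
  · cases PySem.List.pyGet? s i with
    | none => rfl
    | some c => by_cases hO : c = 'O' <;> by_cases hR : c = 'R' <;> simp [hO, hR, pvTable]

-- In state 1 A's loop matches 'R' exactly as B's loop on target ['R'].
theorem or_fsm_loop_state1 (s : List Char) (n i : Int) :
    or_fsm_loop s n i 1 = or_fsm_alt_loop s n i ['R'] := by
  rw [or_fsm_loop, or_fsm_alt_loop]
  split
  · rfl
  · cases PySem.List.pyGet? s i with
    | none => rfl
    | some c =>
      by_cases hO : c = 'O' <;> by_cases hR : c = 'R' <;>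
        simp_all [pvTable, or_fsm_alt_loop, or_fsm_loop_state2]

-- In state 0 A's loop matches 'O' exactly as B's loop on target ['O','R'].
theorem or_fsm_loop_state0 (s : List Char) (n i : Int) :
    or_fsm_loop s n i 0 = or_fsm_alt_loop s n i ['O', 'R'] := by
  rw [or_fsm_loop, or_fsm_alt_loop]
  split
  · rfl
  · cases PySem.List.pyGet? s i with
    | none => rfl
    | some c =>
      by_cases hO : c = 'O' <;> by_cases hR : c = 'R' <;>
        simp_all [pvTable, or_fsm_loop_state1]

-- ===== VERDICT (by name: the statement is the Claim_ definition above) =====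
theorem or_fsm_spec : Claim_equal_or_fsm := by
  intro s index _ _
  unfold Spec_or_fsm or_fsm or_fsm_alt
  rw [or_fsm_loop_state0]
  rfl
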